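-- pv_equiv track=rewrite | github.com/Pujithakallu/LeetcodeSolutions | solutions/problem_1997_first_day_where_you_have_been_in_all_the_rooms/solution.py | firstDayBeenInAllRooms
-- ===== SOURCE A (Python) =====
-- from typing import List
--
-- def firstDayBeenInAllRooms(nextVisit: List[int]) -> int:
--     # Dynamic programming (1D) - O(n) time, O(n) space
--     if not nextVisit:
--         return 0
--     n = len(nextVisit) if isinstance(nextVisit, list) else nextVisit
--     dp = [0] * (n + 1)
--     dp[0] = 1  # base case
--     for i in range(1, n + 1):
--         dp[i] = dp[i-1]  # transition (customize per problem)
--         if i >= 2: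
--             dp[i] += dp[i-2]
--     return dp[n]
-- ===== SOURCE B (Python) =====
-- from typing import List
--
-- def firstDayBeenInAllRooms(nextVisit: List[int]) -> int:
--     # The DP recurrence dp[0]=1, dp[1]=1, dp[i]=dp[i-1]+dp[i-2] is Fibonacci:
--     # dp[n] = Fib(n+1).  Compute it by fast doubling in O(log n) multiplications.
--     if not nextVisit:
--         return 0
--     n = len(nextVisit) if isinstance(nextVisit, list) else nextVisit
--
--     def fd(k):
--         # returns (Fib(k), Fib(k+1))
--         if k == 0:
--             return (0, 1)
--         a, b = fd(k >> 1)
--         c = a * (2 * b - a)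
--         d = a * a + b * b
--         return (d, c + d) if k & 1 else (c, d)
--
--     return fd(n)[1]
-- ===== Notes on version B (the rewrite author's own statement) =====
-- stated objective: faster
-- what changed: Replaced the O(n) DP array (which just computes Fibonacci: dp[n]=Fib(n+1)) by fast-doubling Fibonacci recursing on the bits of n.
import Mathlib
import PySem

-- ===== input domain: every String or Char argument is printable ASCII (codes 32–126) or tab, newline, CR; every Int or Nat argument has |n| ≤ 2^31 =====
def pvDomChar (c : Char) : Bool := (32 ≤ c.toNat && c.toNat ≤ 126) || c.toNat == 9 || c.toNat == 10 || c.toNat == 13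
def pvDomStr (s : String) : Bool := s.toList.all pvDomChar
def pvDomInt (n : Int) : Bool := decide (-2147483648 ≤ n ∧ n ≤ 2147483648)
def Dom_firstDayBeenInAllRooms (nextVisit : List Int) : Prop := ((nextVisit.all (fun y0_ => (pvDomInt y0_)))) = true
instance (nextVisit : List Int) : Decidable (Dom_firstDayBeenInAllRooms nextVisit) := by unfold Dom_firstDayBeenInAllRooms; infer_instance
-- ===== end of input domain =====

-- B replaces the linear Fibonacci DP by fast-doubling Fibonacci (objective: faster, O(log n) multiplications).


-- ===== PORT A =====
-- one iteration of A's loop body: dp[i] = dp[i-1]; if i >= 2: dp[i] += dp[i-2]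
-- (indices are always in range, so getD is exact)
def loopA (dp : List Int) (i : Nat) : List Int :=
  let v := dp.getD (i - 1) 0
  let v := if 2 ≤ i then v + dp.getD (i - 2) 0 else v
  dp.set i v

def firstDayBeenInAllRooms (nextVisit : List Int) : Int :=
  if nextVisit = [] then 0
  else
    let n := nextVisit.length
    let dp := (List.replicate (n + 1) (0 : Int)).set 0 1
    let dp := (List.range' 1 n).foldl loopA dp
    dp.getD n 0

-- ===== PORT B =====
-- fast doubling: fd k = (Fib k, Fib (k+1)); recursion on k >> 1
def fd (k : Nat) : Int × Int :=
  if _h : k = 0 then (0, 1)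
  else
    let p := fd (k / 2)
    let a := p.1
    let b := p.2
    let c := a * (2 * b - a)
    let d := a * a + b * b
    if k % 2 = 1 then (d, c + d) else (c, d)
termination_by k
decreasing_by omega

def firstDayBeenInAllRooms_alt (nextVisit : List Int) : Int :=
  if nextVisit = [] then 0
  else (fd nextVisit.length).2

-- ===== PRECONDITION & SPEC =====
def Spec_firstDayBeenInAllRooms (nextVisit : List Int) (out : Int) : Prop := out = firstDayBeenInAllRooms_alt nextVisit
instance (nextVisit : List Int) (out : Int) : Decidable (Spec_firstDayBeenInAllRooms nextVisit out) := by unfold Spec_firstDayBeenInAllRooms; infer_instance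

-- ===== CLAIM (what is proved, stated in full; the proofs are below) =====
def Claim_equal_firstDayBeenInAllRooms : Prop := ∀ (nextVisit : List Int), Dom_firstDayBeenInAllRooms nextVisit → Spec_firstDayBeenInAllRooms nextVisit (firstDayBeenInAllRooms nextVisit)

-- ===== LEMMAS AND PROOFS =====

-- fast doubling computes Fibonacci pairs
theorem fd_eq (k : Nat) : fd k = ((Nat.fib k : Int), (Nat.fib (k + 1) : Int)) := by
  induction k using Nat.strong_induction_on with
  | _ k ih =>
    rw [fd]
    by_cases h : k = 0
    · simp [h]
    · have ihm := ih (k / 2) (by omega)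
      simp only [h, dite_false, ihm]
      by_cases hp : k % 2 = 1
      · obtain ⟨m, rfl⟩ : ∃ m, k = 2 * m + 1 := ⟨k / 2, by omega⟩
        have h2 : Nat.fib m ≤ 2 * Nat.fib (m + 1) := by
          have := Nat.fib_le_fib_succ (n := m); omega
        have hq : (2 * m + 1) / 2 = m := by omega
        rw [if_pos hp, hq, Prod.mk.injEq]
        constructor
        · rw [Nat.fib_two_mul_add_one]; push_cast; ring
        · rw [show 2 * m + 1 + 1 = 2 * m + 2 from rfl, Nat.fib_add_two, Nat.fib_two_mul,
            Nat.fib_two_mul_add_one, Nat.cast_add, Nat.cast_mul, Nat.cast_sub h2]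
          push_cast; ring
      · obtain ⟨m, rfl⟩ : ∃ m, k = 2 * m := ⟨k / 2, by omega⟩
        have h2 : Nat.fib m ≤ 2 * Nat.fib (m + 1) := by
          have := Nat.fib_le_fib_succ (n := m); omega
        have hq : 2 * m / 2 = m := by omega
        rw [if_neg hp, hq, Prod.mk.injEq]
        constructor
        · rw [Nat.fib_two_mul, Nat.cast_mul, Nat.cast_sub h2]; push_cast; ring
        · rw [Nat.fib_two_mul_add_one]; push_cast; ring

-- invariant of A's loop: after processing range' 1 j (j ≤ n), slot i holds Fib(i+1) for i ≤ j, else 0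
theorem loopA_inv (n j : Nat) (hj : j ≤ n) :
    let dp := (List.range' 1 j).foldl loopA ((List.replicate (n + 1) (0 : Int)).set 0 1)
    dp.length = n + 1 ∧ ∀ i : Nat, dp.getD i 0 = if i ≤ j then (Nat.fib (i + 1) : Int) else 0 := by
  induction j with
  | zero =>
    refine ⟨by simp, ?_⟩
    intro i
    rcases Nat.eq_zero_or_pos i with hi | hi
    · subst hi; simp [List.getD]
    · have : ¬ i ≤ 0 := by omega
      simp only [this, if_false, List.range'_zero, List.foldl_nil, List.getD]
      rcases Nat.lt_or_ge i (n + 1) with h | h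
      · rw [List.getElem?_eq_getElem (by simp [h])]
        simp [show ¬ (0 = i) from by omega]
      · rw [List.getElem?_eq_none (by simp; omega)]; rfl
  | succ j ih =>
    have ⟨hlen, hinv⟩ := ih (by omega)
    rw [List.range'_concat, List.foldl_append]
    simp only [one_mul]
    simp only [List.foldl_cons, List.foldl_nil]
    set dp := (List.range' 1 j).foldl loopA ((List.replicate (n + 1) (0 : Int)).set 0 1) with hdp
    have hv : loopA dp (1 + j) = dp.set (1 + j) (Nat.fib (j + 2) : Int) := by
      simp only [loopA]
      congr 1
      by_cases h2 : 2 ≤ 1 + j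
      · obtain ⟨p, rfl⟩ : ∃ p, j = p + 1 := ⟨j - 1, by omega⟩
        rw [if_pos h2, show 1 + (p + 1) - 1 = p + 1 from by omega,
          show 1 + (p + 1) - 2 = p from by omega, hinv (p + 1), hinv p]
        simp only [le_refl, if_true, show p ≤ p + 1 from by omega]
        rw [show p + 1 + 2 = p + 1 + 2 from rfl, Nat.fib_add_two (n := p + 1),
          Nat.fib_add_two (n := p)]
        push_cast; ring
      · have hj0 : j = 0 := by omega
        subst hj0
        have h0 := hinv 0
        simp only [le_refl, if_true, List.getD_eq_getElem?_getD] at h0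
        simp [h0]
    rw [hv]
    refine ⟨by simp [hlen], ?_⟩
    intro i
    rcases Nat.lt_trichotomy i (1 + j) with h | h | h
    · rw [List.getD, List.getElem?_set_ne (by omega), ← List.getD, hinv i]
      simp [show i ≤ j from by omega, show i ≤ j + 1 from by omega]
    · subst h
      rw [List.getD, List.getElem?_set_self (by omega)]
      simp [show 1 + j ≤ j + 1 from by omega, show 1 + j + 1 = j + 2 from by omega]
    · rw [List.getD, List.getElem?_set_ne (by omega), ← List.getD, hinv i]
      simp [show ¬ i ≤ j from by omega, show ¬ i ≤ j + 1 from by omega]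

-- ===== VERDICT (by name: the statement is the Claim_ definition above) =====
theorem firstDayBeenInAllRooms_spec : Claim_equal_firstDayBeenInAllRooms := by
  intro nextVisit _
  unfold Spec_firstDayBeenInAllRooms firstDayBeenInAllRooms firstDayBeenInAllRooms_alt
  by_cases h : nextVisit = []
  · simp [h]
  · simp only [h, if_false]
    have ⟨_, hinv⟩ := loopA_inv nextVisit.length nextVisit.length le_rfl
    rw [hinv nextVisit.length]
    simp [fd_eq]
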